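-- pv_equiv track=rewrite | github.com/dysnpv/Chinese_Word_Segmentation | BSME.py | check_BSME_valid
-- ===== SOURCE A (Python) =====
-- def check_BSME_valid(z):
--     B_before = False
--     for i in range(len(z)):
--         if B_before:
--             if z[i] == 0 or z[i] == 1:
--                 return False
--             if z[i] == 3:
--                 B_before = False
--         else:
--             if z[i] == 2 or z[i] == 3:
--                 return False
--             if z[i] == 1:
--                 B_before = True
--     return True
-- ===== SOURCE B (Python) =====
-- def _tag(x):
--     if x == 0:
--         return '0'
--     if x == 1:
--         return '1'
--     if x == 2:
--         return '2'
--     if x == 3: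
--         return '3'
--     return 'X'
--
--
-- def check_BSME_valid(z):
--     # Parse the tag string against the word grammar [0X]* (1 [2X]* 3 [0X]*)* (1 [2X]*)?
--     s = ''.join(_tag(z[i]) for i in range(len(z)))
--     i, n = 0, len(s)
--     while True:
--         while i < n and s[i] in '0X':
--             i += 1
--         if i == n:
--             return True
--         if s[i] != '1':
--             return False
--         i += 1
--         while i < n and s[i] in '2X':
--             i += 1
--         if i == n:
--             return True
--         if s[i] != '3':
--             return False
--         i += 1
-- ===== Notes on version B (the rewrite author's own statement) =====
-- stated objective: alternative
-- what changed: Replaces A's in-loop two-state boolean machine with a representation change: map each element to a tag character ('0'-'3' or neutral 'X') and parse the resulting string against the word grammar [0X]*(1[2X]*3[0X]*)*(1[2X]*)? with a two-phase scanning parser.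
import Mathlib
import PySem

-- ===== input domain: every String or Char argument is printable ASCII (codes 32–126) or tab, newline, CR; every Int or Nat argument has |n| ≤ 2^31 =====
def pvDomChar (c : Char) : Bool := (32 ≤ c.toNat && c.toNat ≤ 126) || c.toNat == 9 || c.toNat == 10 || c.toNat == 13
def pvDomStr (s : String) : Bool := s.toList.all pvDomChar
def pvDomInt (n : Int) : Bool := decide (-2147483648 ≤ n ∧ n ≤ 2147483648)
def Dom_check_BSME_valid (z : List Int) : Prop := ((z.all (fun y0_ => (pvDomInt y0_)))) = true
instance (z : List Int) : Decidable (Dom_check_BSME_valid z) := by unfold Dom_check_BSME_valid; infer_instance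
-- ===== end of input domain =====

-- ===== PORT A =====
-- A: single-pass two-state machine (B_before flag) with early return, ported as a
-- structural recursion carrying the same Bool state.
def check_BSME_valid_go : List Int → Bool → Bool
  | [], _ => true
  | x :: xs, b =>
    if b then
      if x == 0 || x == 1 then false
      else check_BSME_valid_go xs (if x == 3 then false else b)
    else
      if x == 2 || x == 3 then false
      else check_BSME_valid_go xs (if x == 1 then true else b)

def check_BSME_valid (z : List Int) : Bool := check_BSME_valid_go z false

-- ===== PORT B =====
-- B: map each value to a tag character, then parse the string against the grammar
-- [0X]* (1 [2X]* 3 [0X]*)* (1 [2X]*)?  with a two-phase scanning parser.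
def bTag (x : Int) : Char :=
  if x == 0 then '0' else if x == 1 then '1' else if x == 2 then '2'
  else if x == 3 then '3' else 'X'

mutual
  -- outside a word: skip '0'/'X'; a '1' opens a word
  def bOuter : List Char → Bool
    | [] => true
    | c :: cs => if c == '0' || c == 'X' then bOuter cs
                 else if c == '1' then bInner cs else false
  -- inside a word: skip '2'/'X'; a '3' closes the word (an open word at the end is accepted)
  def bInner : List Char → Bool
    | [] => true
    | c :: cs => if c == '2' || c == 'X' then bInner cs
                 else if c == '3' then bOuter cs else false
end

def check_BSME_valid_alt (z : List Int) : Bool := bOuter (z.map bTag)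

-- ===== PRECONDITION & SPEC =====
def Spec_check_BSME_valid (z : List Int) (out : Bool) : Prop := out = check_BSME_valid_alt z
instance (z : List Int) (out : Bool) : Decidable (Spec_check_BSME_valid z out) := by unfold Spec_check_BSME_valid; infer_instance

-- ===== CLAIM (what is proved, stated in full; the proofs are below) =====
def Claim_equal_check_BSME_valid : Prop := ∀ (z : List Int), Dom_check_BSME_valid z → Spec_check_BSME_valid z (check_BSME_valid z)

-- ===== LEMMAS AND PROOFS =====
lemma go_eq_parse : ∀ (z : List Int) (b : Bool),
    check_BSME_valid_go z b = (if b then bInner (z.map bTag) else bOuter (z.map bTag))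
  | [], b => by cases b <;> simp [check_BSME_valid_go, bInner, bOuter]
  | x :: xs, b => by
    have ih := go_eq_parse xs
    cases b <;>
      simp only [check_BSME_valid_go, List.map_cons, bInner, bOuter, bTag] <;>
      by_cases h0 : x = 0 <;> by_cases h1 : x = 1 <;> by_cases h2 : x = 2 <;>
        by_cases h3 : x = 3 <;> simp_all

-- ===== VERDICT (by name: the statement is the Claim_ definition above) =====
theorem check_BSME_valid_spec : Claim_equal_check_BSME_valid := by
  intro z _
  unfold Spec_check_BSME_valid check_BSME_valid check_BSME_valid_alt
  simpa using go_eq_parse z false
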